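-- pv_equiv track=rewrite | github.com/GNU-Pony/spike | src/dbctrl.py | value_convert
-- ===== SOURCE A (Python) =====
-- CONVERT_INT = 1
--
-- CONVERT_STR = 2
--
-- def value_convert(value, method):
--     '''
--     Convert a value from bytes to string
--
--     @param   value:bytes  The value
--     @param   method:int   Convertion method
--     @return  :str         The value as string
--     '''
--     rc = ''
--     if method == CONVERT_STR:
--         for c in value:
--             if c == 0:
--                 break
--             rc += chr(c)
--     elif method == CONVERT_INT:
--         for c in value:
--             if (c != 0) or (len(rc) > 0):
--                 rc += chr(c)
--         if rc == '':
--             return '\0'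
--     else:
--         for c in value:
--             rc += chr(c)
--     return rc
-- ===== SOURCE B (Python) =====
-- CONVERT_INT = 1
--
-- CONVERT_STR = 2
--
-- def value_convert(value, method):
--     if method == CONVERT_STR:
--         idx = value.index(0) if 0 in value else len(value)
--         value = value[:idx]
--     elif method == CONVERT_INT:
--         i = next((k for k, c in enumerate(value) if c != 0), len(value))
--         value = value[i:]
--         if not value:
--             return '\0'
--     return ''.join(map(chr, value))
-- ===== Notes on version B (the rewrite author's own statement) =====
-- stated objective: simpler
-- what changed: Replaces A's three per-character accumulator loops (with break/flag logic) by slicing the input list first (index-of-0 slice for CONVERT_STR, drop-leading-zeros slice for CONVERT_INT) and then one chr-join of the slice.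
import Mathlib
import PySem

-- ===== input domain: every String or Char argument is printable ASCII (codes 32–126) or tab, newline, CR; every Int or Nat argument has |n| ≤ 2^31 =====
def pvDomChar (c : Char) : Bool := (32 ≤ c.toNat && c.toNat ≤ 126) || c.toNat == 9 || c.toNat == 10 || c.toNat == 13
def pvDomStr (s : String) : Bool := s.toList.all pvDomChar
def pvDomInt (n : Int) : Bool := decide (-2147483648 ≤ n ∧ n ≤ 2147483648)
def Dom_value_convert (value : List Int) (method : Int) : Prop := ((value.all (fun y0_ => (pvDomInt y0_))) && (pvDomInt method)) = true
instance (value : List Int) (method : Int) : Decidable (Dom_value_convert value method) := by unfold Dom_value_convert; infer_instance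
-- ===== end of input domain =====

-- B slices the input list first (index-of-0 / drop-leading-zeros) and then does one chr-join, replacing A's accumulator loops (simpler decomposition, same cost).


-- chr(c): exact for 0 ≤ c a valid non-surrogate codepoint (guaranteed by Pre_ on every c either port converts)
def pychr (c : Int) : Char := Char.ofNat c.toNat

-- ===== PORT A =====
-- the CONVERT_STR loop: break at the first 0, else append chr(c)
def aStrLoop : List Int → List Char → List Char
  | [], rc => rc
  | c :: t, rc => if c = 0 then rc else aStrLoop t (rc ++ [pychr c])

-- the CONVERT_INT loop: append chr(c) when c != 0 or len(rc) > 0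
def aIntLoop : List Int → List Char → List Char
  | [], rc => rc
  | c :: t, rc => aIntLoop t (if c ≠ 0 ∨ 0 < rc.length then rc ++ [pychr c] else rc)

def value_convert (value : List Int) (method : Int) : String :=
  if method = 2 then String.ofList (aStrLoop value [])
  else if method = 1 then
    let rc := aIntLoop value []
    if rc = [] then "\x00" else String.ofList rc
  else String.ofList (value.foldl (fun rc c => rc ++ [pychr c]) [])

-- ===== PORT B =====
def value_convert_alt (value : List Int) (method : Int) : String :=
  if method = 2 then
    -- idx = value.index(0) if 0 in value else len(value); value = value[:idx]
    let v := match PySem.List.index? value 0 with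
      | some i => value.take i      -- value[:i] with 0 ≤ i ≤ len: take is exact here
      | none => value
    String.ofList (v.map pychr)     -- ''.join(map(chr, value))
  else if method = 1 then
    -- i = next((k for k, c in enumerate(value) if c != 0), len(value)); value = value[i:]
    let v := value.drop (value.findIdx (· ≠ 0))   -- findIdx returns len if no hit — exact
    if v = [] then "\x00" else String.ofList (v.map pychr)
  else String.ofList (value.map pychr)

-- ===== PRECONDITION & SPEC =====
-- Pre_ excludes only inputs on which A raises ValueError (chr applied to a negative or ≥ 0x110000 codepoint
-- among the elements the selected branch actually converts) or returns a str containing a surrogate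
-- 0xD800–0xDFFF, which is not representable as a Lean String; B raises/returns identically on those inputs.
def Pre_value_convert (value : List Int) (method : Int) : Prop :=
  ∀ c ∈ (if method = 2 then value.takeWhile (· ≠ 0)
         else if method = 1 then value.dropWhile (· = 0)
         else value),
    0 ≤ c ∧ c < 1114112 ∧ ¬(55296 ≤ c ∧ c < 57344)
instance (value : List Int) (method : Int) : Decidable (Pre_value_convert value method) := by
  unfold Pre_value_convert; infer_instance
def pvWitness_value_convert : List Int × Int := ([72, 0, 105], 2)
def Spec_value_convert (value : List Int) (method : Int) (out : String) : Prop := out = value_convert_alt value method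
instance (value : List Int) (method : Int) (out : String) : Decidable (Spec_value_convert value method out) := by unfold Spec_value_convert; infer_instance

-- ===== CLAIM =====
def Claim_equal_value_convert : Prop := ∀ (value : List Int) (method : Int), Dom_value_convert value method → Pre_value_convert value method → Spec_value_convert value method (value_convert value method)

-- ===== LEMMAS AND PROOFS =====

lemma aStrLoop_spec (l : List Int) (rc : List Char) :
    aStrLoop l rc = rc ++ (l.takeWhile (· ≠ 0)).map pychr := by
  induction l generalizing rc with
  | nil => simp [aStrLoop]
  | cons c t ih =>
    by_cases h : c = 0 <;> simp [aStrLoop, h, ih]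

lemma aIntLoop_ne (l : List Int) (rc : List Char) (h : rc ≠ []) :
    aIntLoop l rc = rc ++ l.map pychr := by
  induction l generalizing rc with
  | nil => simp [aIntLoop]
  | cons c t ih =>
    have hlen : 0 < rc.length := List.length_pos_iff.mpr h
    simp only [aIntLoop, if_pos (Or.inr hlen)]
    rw [ih _ (by simp)]
    simp

lemma aIntLoop_nil (l : List Int) :
    aIntLoop l [] = (l.dropWhile (· = 0)).map pychr := by
  induction l with
  | nil => simp [aIntLoop]
  | cons c t ih =>
    by_cases h : c = 0
    · simp [aIntLoop, h, ih]
    · simp only [aIntLoop, List.dropWhile_cons]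
      rw [if_pos (Or.inl h), if_neg (by simpa using h)]
      simpa using aIntLoop_ne t [pychr c] (by simp)

-- B's index-of-0 slice equals take-up-to-the-first-zero
lemma take_index?_zero (l : List Int) :
    (match PySem.List.index? l 0 with
     | some i => l.take i
     | none => l) = l.takeWhile (· ≠ 0) := by
  induction l with
  | nil => simp [PySem.List.index?]
  | cons c t ih =>
    by_cases h : c = 0
    · subst h
      rw [PySem.List.index?_cons_self]
      simp
    · have hne : PySem.List.index? (c :: t) 0 = (PySem.List.index? t 0).map (· + 1) :=
        PySem.List.index?_cons_of_ne t (by simpa using h)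
      rw [List.takeWhile_cons, if_pos (by simpa using h)]
      cases hidx : PySem.List.index? t 0 with
      | some i =>
        rw [hidx] at hne
        have ih' : List.take i t = t.takeWhile (· ≠ 0) := by rw [hidx] at ih; exact ih
        rw [hne]
        simpa using ih'
      | none =>
        rw [hidx] at hne
        have ih' : t = t.takeWhile (· ≠ 0) := by rw [hidx] at ih; exact ih
        rw [hne]
        simpa using ih' 

-- B's drop-to-first-nonzero slice equals dropping the leading zeros
lemma drop_findIdx_ne (l : List Int) :
    l.drop (l.findIdx (· ≠ 0)) = l.dropWhile (· = 0) := by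
  induction l with
  | nil => rfl
  | cons c t ih =>
    by_cases h : c = 0
    · subst h
      rw [List.findIdx_cons, List.dropWhile_cons]
      rw [show (decide ((0:Int) ≠ 0)) = false by simp, show (decide ((0:Int) = 0)) = true by simp]
      simpa using ih
    · simp only [List.findIdx_cons, List.dropWhile_cons]
      rw [show (decide (c ≠ 0)) = true by simpa using h]
      simp [h]

-- ===== VERDICT =====
theorem value_convert_spec : Claim_equal_value_convert := by
  intro value method _ _
  unfold Spec_value_convert value_convert value_convert_alt
  by_cases h2 : method = 2
  · rw [if_pos h2, if_pos h2, aStrLoop_spec, take_index?_zero]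
    simp
  · by_cases h1 : method = 1
    · rw [if_neg h2, if_neg h2, if_pos h1, if_pos h1]
      simp only [aIntLoop_nil, drop_findIdx_ne]
      split_ifs with he hn hn
      · rfl
      · exact absurd (by simpa using he) hn
      · exact absurd (by simpa using hn) he
      · rfl
    · rw [if_neg h2, if_neg h2, if_neg h1, if_neg h1,
        PySem.List.foldl_append_singleton_eq_map]
      simp
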